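-- pv_equiv track=rewrite | github.com/adam2809/wikiConnect | crawler.py | getIDfromHref
-- ===== SOURCE A (Python) =====
-- def getIDfromHref(href):
--     href = bytearray(href,'utf-8')
--     pow = 1
--     res = 0
--     while(href[-1] != ord('Q')):
--         res += (href[-1] - 48) * pow
--         del href[-1]
--         pow *=  10
--     return res
-- ===== SOURCE B (Python) =====
-- def getIDfromHref(href):
--     data = bytearray(href, 'utf-8')
--     parts = data.rsplit(b'Q', 1)
--     digits = parts[1]
--     res = 0
--     for b in digits:
--         res = res * 10 + (b - 48)
--     return res
-- ===== Notes on version B (the rewrite author's own statement) =====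
-- stated objective: idiomatic
-- what changed: Replaces the backward while-loop with power-of-ten accumulator and repeated del href[-1] by a single rsplit on b'Q' followed by a forward Horner-style pass over the digit bytes.
import Mathlib
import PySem

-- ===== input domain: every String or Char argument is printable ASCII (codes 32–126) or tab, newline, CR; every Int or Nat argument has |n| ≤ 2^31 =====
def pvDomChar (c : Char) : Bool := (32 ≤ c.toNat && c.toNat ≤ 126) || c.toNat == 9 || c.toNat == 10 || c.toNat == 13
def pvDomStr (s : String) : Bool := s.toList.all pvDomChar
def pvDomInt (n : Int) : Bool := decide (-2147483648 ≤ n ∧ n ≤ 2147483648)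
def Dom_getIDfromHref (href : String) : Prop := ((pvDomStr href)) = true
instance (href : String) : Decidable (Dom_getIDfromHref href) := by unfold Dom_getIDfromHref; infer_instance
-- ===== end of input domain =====

-- B replaces A's backward while-loop (power-of-ten accumulator, del href[-1]) by rsplit on 'Q'
-- plus a forward Horner pass over the suffix bytes; objective: idiomatic, same exact values.


-- ===== PORT A =====
-- A's while-loop, processing the utf-8 bytes back-to-front (on the ASCII domain each char is one
-- byte, value c.toNat); state (pow, res) as in A; the empty case is where Python raises IndexError
-- (excluded by Pre_), the port returns the accumulated res there.
def goA : List Char → Int → Int → Int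
  | [], _, res => res
  | c :: rest, pow, res =>
    if c ≠ 'Q' then goA rest (pow * 10) (res + ((c.toNat : Int) - 48) * pow) else res

def getIDfromHref (href : String) : Int := goA href.toList.reverse 1 0

-- ===== PORT B =====
-- Source B: rsplit(b'Q',1) keeps the suffix after the LAST 'Q'; then a forward Horner pass.
def rsplitLastQ (l : List Char) : List Char := (l.reverse.takeWhile (fun c => c ≠ 'Q')).reverse

def getIDfromHref_alt (href : String) : Int :=
  (rsplitLastQ href.toList).foldl (fun r c => r * 10 + ((c.toNat : Int) - 48)) 0

-- ===== PRECONDITION & SPEC =====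
-- Pre_: the string contains a 'Q'; otherwise Python A raises IndexError (href[-1] on the
-- exhausted bytearray) and Python B raises IndexError too (parts[1] after a 1-element rsplit).
def Pre_getIDfromHref (href : String) : Prop := 'Q' ∈ href.toList
instance (href : String) : Decidable (Pre_getIDfromHref href) := by unfold Pre_getIDfromHref; infer_instance
def pvWitness_getIDfromHref : String := "wiki/Q42"

def Spec_getIDfromHref (href : String) (out : Int) : Prop := out = getIDfromHref_alt href
instance (href : String) (out : Int) : Decidable (Spec_getIDfromHref href out) := by unfold Spec_getIDfromHref; infer_instance

-- ===== CLAIM (what is proved, stated in full; the proofs are below) =====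
def Claim_equal_getIDfromHref : Prop := ∀ (href : String), Dom_getIDfromHref href → Pre_getIDfromHref href → Spec_getIDfromHref href (getIDfromHref href)

-- ===== LEMMAS AND PROOFS =====

-- the value A's loop assigns to a reversed digit-suffix
def revVal : List Char → Int
  | [] => 0
  | c :: cs => ((c.toNat : Int) - 48) + 10 * revVal cs

theorem goA_eq_revVal (l : List Char) : ∀ (pow res : Int),
    goA l pow res = res + pow * revVal (l.takeWhile (fun c => c ≠ 'Q')) := by
  induction l with
  | nil => intro pow res; simp [goA, revVal]
  | cons c cs ih =>
    intro pow res
    by_cases h : c = 'Q'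
    · simp [goA, h, List.takeWhile, revVal]
    · have h1 : goA (c :: cs) pow res = goA cs (pow * 10) (res + ((c.toNat : Int) - 48) * pow) := by
        simp [goA, h]
      rw [h1, ih, List.takeWhile_cons_of_pos (by simp [h]), revVal]
      ring

theorem horner_reverse_eq_revVal (ds : List Char) :
    (ds.reverse.foldl (fun r c => r * 10 + ((c.toNat : Int) - 48)) 0) = revVal ds := by
  induction ds with
  | nil => simp [revVal]
  | cons c cs ih => simp [List.foldl_append, revVal, ih]; ring

-- ===== VERDICT (by name: the statement is the Claim_ definition above) =====
theorem getIDfromHref_spec : Claim_equal_getIDfromHref := by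
  intro href _ _
  unfold Spec_getIDfromHref getIDfromHref getIDfromHref_alt rsplitLastQ
  rw [goA_eq_revVal, horner_reverse_eq_revVal]
  simp
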